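-- pv_equiv track=rewrite | github.com/BKaperick/Bryan-Kaperick.me | content/photos/create_html.py | get_album_block
-- ===== SOURCE A (Python) =====
-- from math import sqrt,floor
--
-- def get_grid(photo_count):
--     rows = floor(sqrt(photo_count))
--     columns = photo_count // rows
--     rows_with_extra = photo_count % rows
--
--     elem = """"""
--     count = 0
--     for r in range(rows):
--         elem += '<div class="photorow">\n'
--         for c in range(columns + int(r < rows_with_extra)):
--             elem += '<div class="photocolumn"> {0} </div>\n'.format("{" + str(count) + "}")
--             count += 1
--         elem += '</div>\n'
--     return elem
--
-- def get_album_block(album, photo_blocks):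
--     pre = """
-- <div class="album">
--     <figure class="album">
-- """.format(album)
--     #images = [x[0] for x in sorted(photo_blocks, key=order_photos)]
--     images = [x[0] for x in photo_blocks]
--     images_elem = get_grid(len(images)).format(*images)
--
--     post = """
--     <figcaption>
-- <?=$p->{0}->$lang;?> ~ <?=$p->{0}->year;?>
--     </figcaption>
--     </figure>
-- </div>
-- """.format(album)
--
--     return pre + images_elem + post
-- ===== SOURCE B (Python) =====
-- from math import isqrt
--
-- def get_album_block(album, photo_blocks):
--     images = [b[0] for b in photo_blocks]
--     n = len(images)
--     rows = isqrt(n)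
--     cols = n // rows          # ZeroDivisionError on empty album, as intended
--     extra = n % rows
--     # row r holds images[start(r):start(r+1)] with start(r) = r*cols + min(r, extra)
--     grid = ''.join(
--         '<div class="photorow">\n'
--         + ''.join('<div class="photocolumn"> ' + img + ' </div>\n'
--                   for img in images[r * cols + min(r, extra):(r + 1) * cols + min(r + 1, extra)])
--         + '</div>\n'
--         for r in range(rows))
--     return ('\n<div class="album">\n    <figure class="album">\n'
--             + grid
--             + '\n    <figcaption>\n<?=$p->' + album + '->$lang;?> ~ <?=$p->' + album
--             + '->year;?>\n    </figcaption>\n    </figure>\n</div>\n')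
-- ===== Notes on version B (the rewrite author's own statement) =====
-- stated objective: simpler
-- what changed: A builds a placeholder grid string ('{0}', '{1}', ...) and then runs str.format over it in a second pass with a mutating counter; B splices each image directly in one pass, addressing each row by the closed-form slice images[r*cols+min(r,extra):(r+1)*cols+min(r+1,extra)] instead of a running counter, with no format/template phase at all.
import Mathlib
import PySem

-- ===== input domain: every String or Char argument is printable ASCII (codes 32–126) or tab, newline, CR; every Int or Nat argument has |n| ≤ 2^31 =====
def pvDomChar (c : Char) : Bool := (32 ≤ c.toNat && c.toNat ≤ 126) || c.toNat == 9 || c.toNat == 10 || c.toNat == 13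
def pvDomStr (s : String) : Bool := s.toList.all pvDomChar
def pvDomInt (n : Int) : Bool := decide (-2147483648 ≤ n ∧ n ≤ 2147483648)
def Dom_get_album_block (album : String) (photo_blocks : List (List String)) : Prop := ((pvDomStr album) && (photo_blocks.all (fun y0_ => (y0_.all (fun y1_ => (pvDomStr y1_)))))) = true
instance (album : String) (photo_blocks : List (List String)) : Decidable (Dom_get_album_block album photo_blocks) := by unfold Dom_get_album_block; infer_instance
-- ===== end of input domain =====

-- B replaces A's two-phase grid construction (placeholder template '{0}','{1}',… then str.format)
-- by a single direct pass whose rows are closed-form slices of the image list (objective: simpler).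


-- ===== PORT A =====
-- str.format over the runtime-built grid template: literal text is copied, '{'<digits>'}'
-- is replaced by the argument at that index.  Exact for the templates get_grid produces
-- (literal brace-free text and in-range '{k}' fields) — the only shape A ever formats.
mutual
def pyFmt : List Char → List String → List Char
  | [], _ => []
  | c :: rest, args => if c = '{' then pyFmtPH rest 0 args else c :: pyFmt rest args
def pyFmtPH : List Char → Nat → List String → List Char
  | [], _, _ => []
  | c :: rest, k, args =>
      if c = '}' then (args.getD k "").toList ++ pyFmt rest args
      else pyFmtPH rest (10 * k + (c.toNat - 48)) args
end

-- floor(sqrt(photo_count)) ported as Nat.sqrt (float sqrt is exact on attainable list lengths);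
-- for photo_count = 0 Python raises ZeroDivisionError (excluded by Pre_), Lean's /,% give 0.
def get_grid (photo_count : Nat) : String :=
  let rows := Nat.sqrt photo_count
  let columns := photo_count / rows
  let rows_with_extra := photo_count % rows
  ((List.range rows).foldl (fun (st : String × Nat) r =>
      let st1 : String × Nat := (st.1 ++ "<div class=\"photorow\">\n", st.2)
      let st2 := (List.range (columns + (if r < rows_with_extra then 1 else 0))).foldl
        (fun (st : String × Nat) _c =>
          -- '<div class="photocolumn"> {0} </div>\n'.format("{" + str(count) + "}"):
          -- a constant one-field template, ported as the splice of its argument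
          (st.1 ++ ("<div class=\"photocolumn\"> " ++ ("{" ++ PySem.Int.toStr (st.2 : Int) ++ "}") ++ " </div>\n"),
           st.2 + 1)) st1
      (st2.1 ++ "</div>\n", st2.2)) ("", 0)).1

def get_album_block (album : String) (photo_blocks : List (List String)) : String :=
  -- pre: """…""".format(album) on a field-free constant template is the template itself
  let pre := "\n<div class=\"album\">\n    <figure class=\"album\">\n"
  -- x[0]; IndexError on an empty inner list (excluded by Pre_), headD's default unreachable there
  let images := photo_blocks.map (fun x => x.headD "")
  let images_elem := String.ofList (pyFmt (get_grid images.length).toList images)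
  -- post: constant template whose only field {0} is album, twice — ported as the splice
  let post := "\n    <figcaption>\n<?=$p->" ++ album ++ "->$lang;?> ~ <?=$p->" ++ album
      ++ "->year;?>\n    </figcaption>\n    </figure>\n</div>\n"
  pre ++ images_elem ++ post

-- ===== PORT B =====
def pvRowHtml (imgs : List String) : String :=
  "<div class=\"photorow\">\n"
    ++ String.join (imgs.map (fun img => "<div class=\"photocolumn\"> " ++ img ++ " </div>\n"))
    ++ "</div>\n"

def get_album_block_alt (album : String) (photo_blocks : List (List String)) : String :=
  let images := photo_blocks.map (fun b => b.headD "")   -- b[0]; empty b excluded by Pre_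
  let n := images.length
  let rows := Nat.sqrt n                                  -- isqrt(n)
  let cols := n / rows                                    -- ZeroDivisionError for n = 0: excluded by Pre_
  let extra := n % rows
  let grid := String.join ((List.range rows).map (fun r =>
      pvRowHtml (PySem.List.slice images
        (some ((r * cols + min r extra : Nat) : Int))
        (some (((r + 1) * cols + min (r + 1) extra : Nat) : Int)))))
  "\n<div class=\"album\">\n    <figure class=\"album\">\n" ++ grid
    ++ ("\n    <figcaption>\n<?=$p->" ++ album ++ "->$lang;?> ~ <?=$p->" ++ album
        ++ "->year;?>\n    </figcaption>\n    </figure>\n</div>\n")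

-- ===== PRECONDITION & SPEC =====
-- Pre_ excludes exactly the inputs where Python A raises: ZeroDivisionError when photo_blocks
-- is empty (rows = 0) and IndexError (x[0]) when some inner list is empty; B raises there too.
def Pre_get_album_block (album : String) (photo_blocks : List (List String)) : Prop :=
  photo_blocks ≠ [] ∧ ∀ b ∈ photo_blocks, b ≠ []
instance (album : String) (photo_blocks : List (List String)) : Decidable (Pre_get_album_block album photo_blocks) := by unfold Pre_get_album_block; infer_instance
def pvWitness_get_album_block : String × List (List String) := ("alb", [["i1"], ["i2"]])

def Spec_get_album_block (album : String) (photo_blocks : List (List String)) (out : String) : Prop := out = get_album_block_alt album photo_blocks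
instance (album : String) (photo_blocks : List (List String)) (out : String) : Decidable (Spec_get_album_block album photo_blocks out) := by unfold Spec_get_album_block; infer_instance

-- ===== CLAIM (what is proved, stated in full; the proofs are below) =====
def Claim_equal_get_album_block : Prop := ∀ (album : String) (photo_blocks : List (List String)), Dom_get_album_block album photo_blocks → Pre_get_album_block album photo_blocks → Spec_get_album_block album photo_blocks (get_album_block album photo_blocks)

-- ===== LEMMAS AND PROOFS =====

-- character-level building blocks of the grid
def unitPH (k : Nat) : List Char :=
  "<div class=\"photocolumn\"> {".toList ++ Nat.toDigits 10 k ++ "} </div>\n".toList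
def unitOut (args : List String) (k : Nat) : List Char :=
  "<div class=\"photocolumn\"> ".toList ++ (args.getD k "").toList ++ " </div>\n".toList
def rowPH (s w : Nat) : List Char :=
  "<div class=\"photorow\">\n".toList ++ (List.range w).flatMap (fun i => unitPH (s + i)) ++ "</div>\n".toList
def rowOut (args : List String) (s w : Nat) : List Char :=
  "<div class=\"photorow\">\n".toList ++ (List.range w).flatMap (fun i => unitOut args (s + i)) ++ "</div>\n".toList

-- pyFmt copies a brace-free literal chunk
theorem pyFmt_lit (s t : List Char) (args : List String) (h : '{' ∉ s) :
    pyFmt (s ++ t) args = s ++ pyFmt t args := by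
  induction s with
  | nil => rfl
  | cons c s ih =>
      have hc : c ≠ '{' := by intro hc; exact h (hc ▸ List.mem_cons_self)
      simp [pyFmt, hc, ih (fun hm => h (List.mem_cons_of_mem _ hm))]

theorem tdc_append (f : Nat) : ∀ (n : Nat) (l : List Char),
    Nat.toDigitsCore 10 f n l = Nat.toDigitsCore 10 f n [] ++ l := by
  induction f with
  | zero => intro n l; simp [Nat.toDigitsCore]
  | succ f ih =>
      intro n l
      simp only [Nat.toDigitsCore]
      by_cases h : n / 10 = 0
      · simp [h]
      · simp only [h, if_false]
        rw [ih (n / 10) (Nat.digitChar (n % 10) :: l), ih (n / 10) [Nat.digitChar (n % 10)]]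
        simp

theorem digitChar_ne_rb {m : Nat} (h : m < 10) : Nat.digitChar m ≠ '}' := by
  interval_cases m <;> decide

theorem digitChar_val {m : Nat} (h : m < 10) : (Nat.digitChar m).toNat - 48 = m := by
  interval_cases m <;> decide

-- scale 10^(number of decimal digits)
def tenScale (n : Nat) : Nat := if n < 10 then 10 else 10 * tenScale (n / 10)
  decreasing_by exact Nat.div_lt_self (by omega) (by omega)

theorem pyFmtPH_digits (f : Nat) : ∀ (n : Nat) (ds : List Char) (k : Nat) (args : List String),
    1 ≤ f → n < 10 ^ f →
    pyFmtPH (Nat.toDigitsCore 10 f n ds) k args = pyFmtPH ds (k * tenScale n + n) args := by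
  induction f with
  | zero => intro n ds k args h; omega
  | succ f ih =>
      intro n ds k args _ hn
      simp only [Nat.toDigitsCore]
      by_cases h : n / 10 = 0
      · have hn10 : n < 10 := by omega
        simp [h, pyFmtPH, tenScale, hn10, Nat.mod_eq_of_lt hn10,
          digitChar_ne_rb hn10, digitChar_val hn10]
        ring_nf
      · have hf : 1 ≤ f := by
          rcases Nat.eq_zero_or_pos f with hf0 | hf0
          · exfalso; subst hf0; omega
          · exact hf0
        have hlt : n / 10 < 10 ^ f := Nat.div_lt_of_lt_mul (by rw [pow_succ] at hn; omega)
        simp only [h, if_false]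
        rw [ih (n / 10) _ k args hf hlt]
        have hstep : pyFmtPH (Nat.digitChar (n % 10) :: ds) (k * tenScale (n / 10) + n / 10) args
            = pyFmtPH ds (10 * (k * tenScale (n / 10) + n / 10) + n % 10) args := by
          simp [pyFmtPH, digitChar_ne_rb (Nat.mod_lt n (by omega)),
            digitChar_val (Nat.mod_lt n (by omega))]
        rw [hstep]
        have hsc : tenScale n = 10 * tenScale (n / 10) := by
          rw [tenScale]; simp [show ¬ n < 10 by omega]
        rw [hsc]
        have hcomm : k * (10 * tenScale (n / 10)) = 10 * (k * tenScale (n / 10)) := by ring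
        rw [hcomm]
        congr 1
        omega

theorem pyFmt_unit (k : Nat) (t : List Char) (args : List String) :
    pyFmt (unitPH k ++ t) args = unitOut args k ++ pyFmt t args := by
  have h1 : unitPH k ++ t
      = "<div class=\"photocolumn\"> ".toList
        ++ ('{' :: (Nat.toDigitsCore 10 (k + 1) k ('}' :: (" </div>\n".toList ++ t)))) := by
    simp [unitPH, Nat.toDigits]
    conv_rhs => rw [tdc_append]
  rw [h1, pyFmt_lit _ _ _ (by decide)]
  have h2 : pyFmt ('{' :: (Nat.toDigitsCore 10 (k + 1) k ('}' :: (" </div>\n".toList ++ t)))) args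
      = pyFmtPH (Nat.toDigitsCore 10 (k + 1) k ('}' :: (" </div>\n".toList ++ t))) 0 args := by
    simp [pyFmt]
  rw [h2, pyFmtPH_digits (k + 1) k _ 0 args (by omega)
    (lt_of_lt_of_le (Nat.lt_pow_self (by omega)) (Nat.pow_le_pow_right (by omega) (by omega)))]
  simp only [Nat.zero_mul, Nat.zero_add, pyFmtPH]
  rw [pyFmt_lit _ _ _ (by decide)]
  simp [unitOut]

theorem pyFmt_units (ks : List Nat) (t : List Char) (args : List String) :
    pyFmt (ks.flatMap unitPH ++ t) args = ks.flatMap (unitOut args) ++ pyFmt t args := by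
  induction ks generalizing t with
  | nil => simp
  | cons k ks ih => simp only [List.flatMap_cons, List.append_assoc, pyFmt_unit, ih]

theorem pyFmt_rows (foff fw : Nat → Nat) (rs : List Nat) (t : List Char) (args : List String) :
    pyFmt (rs.flatMap (fun r => rowPH (foff r) (fw r)) ++ t) args
      = rs.flatMap (fun r => rowOut args (foff r) (fw r)) ++ pyFmt t args := by
  induction rs generalizing t with
  | nil => simp
  | cons r rs ih =>
      simp only [rowPH, rowOut, List.append_assoc] at ih
      simp only [List.flatMap_cons, List.append_assoc, rowPH, rowOut]
      rw [pyFmt_lit _ _ _ (by decide)]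
      have hmap : (List.range (fw r)).flatMap (fun i => unitPH (foff r + i))
          = ((List.range (fw r)).map (fun i => foff r + i)).flatMap unitPH := by
        simp [List.flatMap_map]
      have hmap' : (List.range (fw r)).flatMap (fun i => unitOut args (foff r + i))
          = ((List.range (fw r)).map (fun i => foff r + i)).flatMap (unitOut args) := by
        simp [List.flatMap_map]
      rw [hmap, hmap', pyFmt_units, pyFmt_lit _ _ _ (by decide), ih]

-- the A-side inner loop appends the placeholder units c, c+1, …, c+w-1
theorem inner_loop (w : Nat) : ∀ (s : String) (c : Nat),
    (List.range w).foldl (fun (st : String × Nat) _c =>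
      (st.1 ++ ("<div class=\"photocolumn\"> " ++ ("{" ++ PySem.Int.toStr (st.2 : Int) ++ "}") ++ " </div>\n"),
       st.2 + 1)) (s, c)
    = (s ++ String.ofList ((List.range w).flatMap (fun i => unitPH (c + i))), c + w) := by
  induction w with
  | zero =>
      intro s c
      apply Prod.ext
      · apply String.toList_inj.mp; simp
      · simp
  | succ w ih =>
      intro s c
      rw [List.range_succ, List.foldl_append, ih]
      apply Prod.ext
      · apply String.toList_inj.mp
        simp [unitPH, PySem.Int.toStr, PySem.Int.toChars, Nat.toDigits]
        omega
      · simp; omega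

def offAt (cols extra r : Nat) : Nat := r * cols + min r extra
def wAt (cols extra r : Nat) : Nat := cols + (if r < extra then 1 else 0)

theorem outer_loop (cols extra : Nat) (m : Nat) :
    (List.range m).foldl (fun (st : String × Nat) r =>
      let st1 : String × Nat := (st.1 ++ "<div class=\"photorow\">\n", st.2)
      let st2 := (List.range (cols + (if r < extra then 1 else 0))).foldl
        (fun (st : String × Nat) _c =>
          (st.1 ++ ("<div class=\"photocolumn\"> " ++ ("{" ++ PySem.Int.toStr (st.2 : Int) ++ "}") ++ " </div>\n"),
           st.2 + 1)) st1
      (st2.1 ++ "</div>\n", st2.2)) ("", 0)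
    = (String.ofList ((List.range m).flatMap (fun r => rowPH (offAt cols extra r) (wAt cols extra r))),
       offAt cols extra m) := by
  induction m with
  | zero =>
      apply Prod.ext
      · apply String.toList_inj.mp; simp
      · simp [offAt]
  | succ m ih =>
      rw [List.range_succ, List.foldl_append, ih]
      simp only [List.foldl_cons, List.foldl_nil]
      rw [inner_loop]
      apply Prod.ext
      · apply String.toList_inj.mp
        simp [rowPH, wAt]
      · simp only [offAt, Nat.min_def, Nat.succ_mul]
        split_ifs <;> omega

theorem grid_eq (n : Nat) :
    get_grid n
      = String.ofList ((List.range (Nat.sqrt n)).flatMap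
          (fun r => rowPH (offAt (n / Nat.sqrt n) (n % Nat.sqrt n) r) (wAt (n / Nat.sqrt n) (n % Nat.sqrt n) r))) := by
  show ((List.range (Nat.sqrt n)).foldl _ ("", 0)).1 = _
  rw [outer_loop (n / Nat.sqrt n) (n % Nat.sqrt n) (Nat.sqrt n)]

-- a slice with in-range Nat bounds is the list of its elements by index
theorem slice_getD (xs : List String) (s w : Nat) (h : s + w ≤ xs.length) :
    PySem.List.slice xs (some ((s : Nat) : Int)) (some (((s + w : Nat)) : Int))
      = (List.range w).map (fun i => xs.getD (s + i) "") := by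
  rw [PySem.List.slice_natCast]
  apply List.ext_getElem
  · simp; omega
  · intro i h1 h2
    have hi : i < w := by simp at h1; omega
    have hsi : s + i < xs.length := by omega
    simp [List.getD_eq_getElem?_getD, List.getElem?_eq_getElem hsi]

theorem rowHtml_toList (args : List String) (s w : Nat) (h : s + w ≤ args.length) :
    (pvRowHtml (PySem.List.slice args (some ((s : Nat) : Int)) (some (((s + w : Nat)) : Int)))).toList
      = rowOut args s w := by
  rw [slice_getD args s w h]
  simp [pvRowHtml, rowOut, unitOut, String.toList_join, List.flatMap_def,
    Function.comp_def, List.getD]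

-- offsets: stepping and the total
theorem off_succ (cols extra r : Nat) : offAt cols extra (r + 1) = offAt cols extra r + wAt cols extra r := by
  simp only [offAt, wAt, Nat.min_def]
  split_ifs <;> ring_nf <;> omega

theorem off_le (cols extra : Nat) {r m : Nat} (h : r ≤ m) : offAt cols extra r ≤ offAt cols extra m := by
  induction m with
  | zero => simp at h; simp [h]
  | succ m ih =>
      rcases Nat.lt_or_ge r (m + 1) with h1 | h1
      · exact le_trans (ih (by omega)) (by rw [off_succ]; omega)
      · have : r = m + 1 := by omega
        simp [this]

-- the heart: formatting A's placeholder grid with the images gives B's direct grid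
theorem main_grid (images : List String) (h : images ≠ []) :
    String.ofList (pyFmt (get_grid images.length).toList images)
      = String.join ((List.range (Nat.sqrt images.length)).map (fun r =>
          pvRowHtml (PySem.List.slice images
            (some ((r * (images.length / Nat.sqrt images.length) + min r (images.length % Nat.sqrt images.length) : Nat) : Int))
            (some (((r + 1) * (images.length / Nat.sqrt images.length) + min (r + 1) (images.length % Nat.sqrt images.length) : Nat) : Int))))) := by
  set n := images.length with hn
  have hn1 : 1 ≤ n := by
    have := List.length_pos_iff.mpr h; omega
  have hrows : 0 < Nat.sqrt n := Nat.sqrt_pos.mpr (by omega)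
  set rows := Nat.sqrt n
  set cols := n / rows with hcols
  set extra := n % rows with hextra
  have htot : rows * cols + extra = n := Nat.div_add_mod n rows
  have hexlt : extra < rows := Nat.mod_lt n hrows
  have hofftop : offAt cols extra rows = n := by
    simp only [offAt]
    rw [Nat.min_eq_right (by omega)]
    omega
  have hbound : ∀ r ∈ List.range rows, offAt cols extra r + wAt cols extra r ≤ n := by
    intro r hr
    rw [← off_succ]
    rw [← hofftop]
    exact off_le cols extra (by simpa using hr)
  rw [grid_eq, String.toList_ofList]
  rw [show ((List.range rows).flatMap (fun r => rowPH (offAt cols extra r) (wAt cols extra r)))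
      = ((List.range rows).flatMap (fun r => rowPH (offAt cols extra r) (wAt cols extra r))) ++ [] by simp]
  rw [pyFmt_rows (offAt cols extra) (wAt cols extra) (List.range rows) [] images]
  apply String.toList_inj.mp
  rw [String.toList_ofList, String.toList_join]
  have : ∀ r ∈ List.range rows,
      (pvRowHtml (PySem.List.slice images
        (some ((r * cols + min r extra : Nat) : Int))
        (some (((r + 1) * cols + min (r + 1) extra : Nat) : Int)))).toList
      = rowOut images (offAt cols extra r) (wAt cols extra r) := by
    intro r hr
    have hb := hbound r hr
    have hshape : (r + 1) * cols + min (r + 1) extra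
        = (r * cols + min r extra) + wAt cols extra r := by
      have := off_succ cols extra r
      simpa [offAt] using this
    rw [hshape]
    exact rowHtml_toList images (r * cols + min r extra) (wAt cols extra r) (by simpa [offAt] using hb)
  rw [List.map_map]
  rw [List.map_congr_left (by intro r hr; exact this r hr)]
  simp [List.flatMap_def, pyFmt]

-- ===== VERDICT (by name: the statement is the Claim_ definition above) =====
theorem get_album_block_spec : Claim_equal_get_album_block := by
  intro album photo_blocks _hdom hpre
  unfold Spec_get_album_block
  unfold get_album_block get_album_block_alt
  have himg : photo_blocks.map (fun x => x.headD "") ≠ [] := by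
    simp; exact hpre.1
  dsimp only
  rw [main_grid _ himg]
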